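-- pv_equiv track=rewrite | github.com/binbineow/python_general | scripts_sh_verified/Ig_specific/predict_variable2.py | count_region
-- ===== SOURCE A (Python) =====
-- def count_region(list0,above_cut_off):
--     n0 = 0
--     #above_cut_off = 0.1
--     in_region = False
--     for val0 in list0:
--         if val0>=above_cut_off and not in_region:
--             n0 +=1
--             in_region = True
--         if val0< above_cut_off:
--             in_region = False
--     return n0
-- ===== SOURCE B (Python) =====
-- def count_region(list0, above_cut_off):
--     # Run-length encode the >=cutoff flag sequence into maximal runs,
--     # then count the runs whose flag is True.
--     runs = []
--     for val in list0:
--         flag = val >= above_cut_off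
--         if runs and runs[-1][0] == flag:
--             runs[-1][1] += 1
--         else:
--             runs.append([flag, 1])
--     return sum(1 for flag, _ in runs if flag)
-- ===== Notes on version B (the rewrite author's own statement) =====
-- stated objective: alternative
-- what changed: Replaces the stateful in_region flag loop by a run-length encoding stage (group the list into maximal runs of the >=cutoff flag, stored as an explicit run list) followed by a count of the True-flagged runs.
import Mathlib
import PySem

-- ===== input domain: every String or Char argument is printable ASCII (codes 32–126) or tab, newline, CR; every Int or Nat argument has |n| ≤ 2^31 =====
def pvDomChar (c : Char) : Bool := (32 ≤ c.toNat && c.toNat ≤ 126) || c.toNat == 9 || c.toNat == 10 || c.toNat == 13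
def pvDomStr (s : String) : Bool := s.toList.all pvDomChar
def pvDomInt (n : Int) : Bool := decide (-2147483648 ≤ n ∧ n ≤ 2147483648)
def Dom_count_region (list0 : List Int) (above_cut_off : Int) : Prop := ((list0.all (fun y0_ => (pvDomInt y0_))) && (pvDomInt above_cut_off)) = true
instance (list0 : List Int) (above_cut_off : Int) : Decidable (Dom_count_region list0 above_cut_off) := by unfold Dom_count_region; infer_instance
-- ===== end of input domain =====

-- B replaces the in_region flag loop by run-length encoding the >=cutoff flags into
-- maximal runs and counting the True-flagged runs (alternative decomposition; no speed claim).

-- ===== PORT A =====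
def count_region (list0 : List Int) (above_cut_off : Int) : Int :=
  (list0.foldl
    (fun (s : Int × Bool) val0 =>
      let s1 := if val0 ≥ above_cut_off ∧ s.2 = false then (s.1 + 1, true) else s
      if val0 < above_cut_off then (s1.1, false) else s1)
    (0, false)).1

-- ===== PORT B =====
-- runs[-1][1] += 1 : increment the count field of the last run
def bumpLastRun : List (Bool × Int) → List (Bool × Int)
  | [] => []
  | [(f, n)] => [(f, n + 1)]
  | r :: rs => r :: bumpLastRun rs

def count_region_alt (list0 : List Int) (above_cut_off : Int) : Int :=
  let runs := list0.foldl
    (fun (runs : List (Bool × Int)) val =>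
      let flag := decide (val ≥ above_cut_off)
      match runs.getLast? with
      | some (f, _) => if f = flag then bumpLastRun runs else runs ++ [(flag, 1)]
      | none => runs ++ [(flag, 1)])
    []
  runs.foldl (fun (n : Int) (p : Bool × Int) => if p.1 = true then n + 1 else n) 0

-- ===== PRECONDITION & SPEC =====
def Spec_count_region (list0 : List Int) (above_cut_off : Int) (out : Int) : Prop := out = count_region_alt list0 above_cut_off
instance (list0 : List Int) (above_cut_off : Int) (out : Int) : Decidable (Spec_count_region list0 above_cut_off out) := by unfold Spec_count_region; infer_instance

-- ===== CLAIM (what is proved, stated in full; the proofs are below) =====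
def Claim_equal_count_region : Prop := ∀ (list0 : List Int) (above_cut_off : Int), Dom_count_region list0 above_cut_off → Spec_count_region list0 above_cut_off (count_region list0 above_cut_off)

-- ===== LEMMAS AND PROOFS =====

-- number of True-flagged runs
def countT : List (Bool × Int) → Int
  | [] => 0
  | (f, _) :: rs => (if f then 1 else 0) + countT rs

-- flag of the last run, false when there are no runs yet (= A's in_region flag)
def lastFlag (runs : List (Bool × Int)) : Bool := ((runs.getLast?).map Prod.fst).getD false

theorem countT_bumpLast (runs : List (Bool × Int)) : countT (bumpLastRun runs) = countT runs := by
  induction runs with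
  | nil => rfl
  | cons r rs ih =>
    cases rs with
    | nil => cases r; rfl
    | cons r2 rs2 => simp [bumpLastRun, countT, ih]

theorem lastFlag_bumpLast (runs : List (Bool × Int)) : lastFlag (bumpLastRun runs) = lastFlag runs := by
  induction runs with
  | nil => rfl
  | cons r rs ih =>
    cases rs with
    | nil => cases r; rfl
    | cons r2 rs2 =>
      simp only [bumpLastRun, lastFlag] at *
      rw [List.getLast?_cons_cons]
      rw [show (r :: bumpLastRun (r2 :: rs2)).getLast? = (bumpLastRun (r2 :: rs2)).getLast? from ?_]
      · exact ih
      · cases h : bumpLastRun (r2 :: rs2) with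
        | nil => cases rs2 <;> simp [bumpLastRun] at h
        | cons x xs => rw [List.getLast?_cons_cons]

theorem countT_append_one (runs : List (Bool × Int)) (f : Bool) (k : Int) :
    countT (runs ++ [(f, k)]) = countT runs + (if f then 1 else 0) := by
  induction runs with
  | nil => simp [countT]
  | cons r rs ih => cases r; simp [countT, ih]; ring

theorem lastFlag_append_one (runs : List (Bool × Int)) (f : Bool) (k : Int) :
    lastFlag (runs ++ [(f, k)]) = f := by
  simp [lastFlag]

-- one step of A's loop tracks (countT, lastFlag) of one step of B's run-building loop
theorem step_corr (c v : Int) (runs : List (Bool × Int)) :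
    (let s := (countT runs, lastFlag runs)
     let s1 := if v ≥ c ∧ s.2 = false then (s.1 + 1, true) else s
     if v < c then (s1.1, false) else s1)
    = (let flag := decide (v ≥ c)
       let runs' := match runs.getLast? with
         | some (f, _) => if f = flag then bumpLastRun runs else runs ++ [(flag, 1)]
         | none => runs ++ [(flag, 1)]
       (countT runs', lastFlag runs')) := by
  cases h : runs.getLast? with
  | none =>
    have hrs : runs = [] := List.getLast?_eq_none_iff.mp h
    subst hrs
    by_cases hv : v ≥ c
    · simp [hv, not_lt.mpr hv, lastFlag, countT]
    · simp [hv, lt_of_not_ge hv, lastFlag, countT]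
  | some r =>
    obtain ⟨f, k⟩ := r
    have hlf : lastFlag runs = f := by simp [lastFlag, h]
    by_cases hv : v ≥ c
    · have hnl : ¬ v < c := not_lt.mpr hv
      by_cases hf : f = true
      · simp [hv, hnl, hlf, hf, countT_bumpLast, lastFlag_bumpLast]
      · simp only [Bool.not_eq_true] at hf
        simp [hv, hnl, hlf, hf, countT_append_one, lastFlag_append_one]
    · have hl : v < c := lt_of_not_ge hv
      by_cases hf : f = true
      · simp [hv, hl, hlf, hf, countT_append_one, lastFlag_append_one]
      · simp only [Bool.not_eq_true] at hf
        simp [hv, hl, hlf, hf, countT_bumpLast, lastFlag_bumpLast]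

theorem loop_corr (c : Int) (l : List Int) : ∀ (runs : List (Bool × Int)),
    (l.foldl
      (fun (s : Int × Bool) val0 =>
        let s1 := if val0 ≥ c ∧ s.2 = false then (s.1 + 1, true) else s
        if val0 < c then (s1.1, false) else s1)
      (countT runs, lastFlag runs)).1
    = countT (l.foldl
        (fun (runs : List (Bool × Int)) val =>
          let flag := decide (val ≥ c)
          match runs.getLast? with
          | some (f, _) => if f = flag then bumpLastRun runs else runs ++ [(flag, 1)]
          | none => runs ++ [(flag, 1)])
        runs) := by
  induction l with
  | nil => intro runs; rfl
  | cons v rest ih =>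
    intro runs
    simp only [List.foldl_cons]
    rw [show ((let s := (countT runs, lastFlag runs)
       let s1 := if v ≥ c ∧ s.2 = false then (s.1 + 1, true) else s
       if v < c then (s1.1, false) else s1) : Int × Bool)
       = (let flag := decide (v ≥ c)
          let runs' := match runs.getLast? with
            | some (f, _) => if f = flag then bumpLastRun runs else runs ++ [(flag, 1)]
            | none => runs ++ [(flag, 1)]
          (countT runs', lastFlag runs')) from step_corr c v runs]
    exact ih _

theorem sum_fold_eq_countT (runs : List (Bool × Int)) : ∀ (n : Int),
    runs.foldl (fun (n : Int) (p : Bool × Int) => if p.1 = true then n + 1 else n) n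
    = n + countT runs := by
  induction runs with
  | nil => intro n; simp [countT]
  | cons r rs ih =>
    intro n
    cases r with
    | mk f k =>
      cases f
      · simp [countT, ih]
      · simp [countT, ih]; ring

-- ===== VERDICT (by name: the statement is the Claim_ definition above) =====
theorem count_region_spec : Claim_equal_count_region := by
  intro list0 c _
  unfold Spec_count_region count_region count_region_alt
  have h := loop_corr c list0 []
  simp only [countT, lastFlag, List.getLast?_nil, Option.map_none, Option.getD_none] at h
  rw [h, sum_fold_eq_countT]
  ring
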